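-- pv_equiv track=rewrite | github.com/QiyiJiang/BYLW | src/fbbench/eval/retrieval_metrics.py | compute_hit_rank_for_question
-- ===== SOURCE A (Python) =====
-- from typing import Dict, Iterable, List, Optional, Tuple
--
-- def compute_hit_rank_for_question(
--     ranked_page_uids: List[str],
--     gold_page_uids: Iterable[str],
-- ) -> Optional[int]:
--     """返回第一个命中 gold page 的 rank（1-based），未命中返回 None。"""
--     gold_set = set(gold_page_uids)
--     for idx, uid in enumerate(ranked_page_uids, start=1):
--         if uid in gold_set:
--             return idx
--     return None
-- ===== SOURCE B (Python) =====
-- def compute_hit_rank_for_question(ranked_page_uids, gold_page_uids):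
--     """返回第一个命中 gold page 的 rank（1-based），未命中返回 None。"""
--     pos = {}
--     idx = 1
--     for uid in ranked_page_uids:
--         if uid not in pos:
--             pos[uid] = idx
--         idx += 1
--     best = None
--     for uid in gold_page_uids:
--         i = pos.get(uid)
--         if i is not None and (best is None or i < best):
--             best = i
--     return best
-- ===== Notes on version B (the rewrite author's own statement) =====
-- stated objective: alternative
-- what changed: Instead of scanning ranked with a gold-set membership test and returning on the first hit, B builds a first-occurrence position table over ranked in one pass and then takes the minimum recorded position over the gold uids.
import Mathlib
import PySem

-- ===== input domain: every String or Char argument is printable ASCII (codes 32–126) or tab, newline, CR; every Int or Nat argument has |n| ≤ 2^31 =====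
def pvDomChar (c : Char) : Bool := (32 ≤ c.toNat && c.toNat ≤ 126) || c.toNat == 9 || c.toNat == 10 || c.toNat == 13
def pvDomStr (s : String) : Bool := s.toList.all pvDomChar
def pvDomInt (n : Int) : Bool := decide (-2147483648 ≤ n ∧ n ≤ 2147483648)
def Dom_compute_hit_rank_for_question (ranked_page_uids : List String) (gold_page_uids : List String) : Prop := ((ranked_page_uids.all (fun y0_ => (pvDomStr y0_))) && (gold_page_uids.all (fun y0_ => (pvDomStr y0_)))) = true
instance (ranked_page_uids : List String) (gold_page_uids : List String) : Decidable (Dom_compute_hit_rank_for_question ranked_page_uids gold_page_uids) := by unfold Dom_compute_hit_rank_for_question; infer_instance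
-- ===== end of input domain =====

-- B replaces A's early-return scan over ranked (with a gold-set membership test) by a
-- first-occurrence position table built over ranked, then a minimum over the gold uids (alternative decomposition).

-- ===== PORT A =====
-- the 'for idx, uid in enumerate(ranked_page_uids, start=1): if uid in gold_set: return idx' loop
def chrqA_loop (gold_set : PySem.Set String) : List String → Int → Option Int
  | [], _ => none
  | uid :: rest, idx => if uid ∈ gold_set then some idx else chrqA_loop gold_set rest (idx + 1)

def compute_hit_rank_for_question (ranked_page_uids : List String) (gold_page_uids : List String) : Option Int :=
  chrqA_loop (PySem.Set.ofList gold_page_uids) ranked_page_uids 1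

-- ===== PORT B =====
-- first pass: 'for uid in ranked: if uid not in pos: pos[uid] = idx; idx += 1'
def chrqB_build : List String → Int → PySem.Dict String Int → PySem.Dict String Int
  | [], _, pos => pos
  | uid :: rest, idx, pos =>
      chrqB_build rest (idx + 1) (if pos.contains uid then pos else pos.insert uid idx)

-- second pass: 'for uid in gold: i = pos.get(uid); if i is not None and (best is None or i < best): best = i'
def chrqB_scan (pos : PySem.Dict String Int) : List String → Option Int → Option Int
  | [], best => best
  | uid :: rest, best =>
      match pos.get? uid with
      | none => chrqB_scan pos rest best
      | some i => chrqB_scan pos rest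
          (match best with
           | none => some i
           | some b => if i < b then some i else some b)

def compute_hit_rank_for_question_alt (ranked_page_uids : List String) (gold_page_uids : List String) : Option Int :=
  chrqB_scan (chrqB_build ranked_page_uids 1 PySem.Dict.empty) gold_page_uids none

-- ===== PRECONDITION & SPEC =====
def Spec_compute_hit_rank_for_question (ranked_page_uids : List String) (gold_page_uids : List String) (out : Option Int) : Prop := out = compute_hit_rank_for_question_alt ranked_page_uids gold_page_uids
instance (ranked_page_uids : List String) (gold_page_uids : List String) (out : Option Int) : Decidable (Spec_compute_hit_rank_for_question ranked_page_uids gold_page_uids out) := by unfold Spec_compute_hit_rank_for_question; infer_instance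

-- ===== CLAIM (what is proved, stated in full; the proofs are below) =====
def Claim_equal_compute_hit_rank_for_question : Prop := ∀ (ranked_page_uids : List String) (gold_page_uids : List String), Dom_compute_hit_rank_for_question ranked_page_uids gold_page_uids → Spec_compute_hit_rank_for_question ranked_page_uids gold_page_uids (compute_hit_rank_for_question ranked_page_uids gold_page_uids)

-- ===== LEMMAS AND PROOFS =====

-- scan over gold uids none of which are in the table leaves the accumulator unchanged
theorem chrq_scan_none (gold : List String) (pos : PySem.Dict String Int) (best : Option Int)
    (h : ∀ u ∈ gold, pos.get? u = none) : chrqB_scan pos gold best = best := by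
  induction gold generalizing best with
  | nil => rfl
  | cons u rest ih =>
      simp only [chrqB_scan, h u (List.mem_cons_self ..)]
      exact ih best (fun v hv => h v (List.mem_cons_of_mem _ hv))

-- if every present gold value is >= k, an accumulator (some k) survives the scan
theorem chrq_scan_ge (gold : List String) (pos : PySem.Dict String Int) (k : Int)
    (h : ∀ u ∈ gold, ∀ i, pos.get? u = some i → k ≤ i) :
    chrqB_scan pos gold (some k) = some k := by
  induction gold with
  | nil => rfl
  | cons u rest ih =>
      have htail : ∀ v ∈ rest, ∀ i, pos.get? v = some i → k ≤ i :=
        fun v hv => h v (List.mem_cons_of_mem _ hv)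
      cases hget : pos.get? u with
      | none => simp only [chrqB_scan, hget]; exact ih htail
      | some i =>
          have hk : k ≤ i := h u (List.mem_cons_self ..) i hget
          simp only [chrqB_scan, hget]
          have hif : (if i < k then some i else some k) = some k := by
            split_ifs with hik
            · omega
            · rfl
          rw [hif]
          exact ih htail

-- if some gold uid maps to k, every present gold value is >= k, and the accumulator is none or >= k,
-- the scan returns some k
theorem chrq_scan_hit (gold : List String) (pos : PySem.Dict String Int) (k : Int) (u0 : String)
    (hget0 : pos.get? u0 = some k) (hmem : u0 ∈ gold)
    (hlb : ∀ u ∈ gold, ∀ i, pos.get? u = some i → k ≤ i)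
    (best : Option Int) (hbest : best = none ∨ ∃ b, best = some b ∧ k ≤ b) :
    chrqB_scan pos gold best = some k := by
  induction gold generalizing best with
  | nil => cases hmem
  | cons u rest ih =>
      have htail : ∀ v ∈ rest, ∀ i, pos.get? v = some i → k ≤ i :=
        fun v hv => hlb v (List.mem_cons_of_mem _ hv)
      cases hget : pos.get? u with
      | none =>
          have hu0 : u0 ∈ rest := by
            rcases List.mem_cons.mp hmem with h | h
            · rw [h] at hget0; rw [hget0] at hget; cases hget
            · exact h
          simp only [chrqB_scan, hget]
          exact ih hu0 htail best hbest
      | some i =>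
          have hk : k ≤ i := hlb u (List.mem_cons_self ..) i hget
          simp only [chrqB_scan, hget]
          by_cases heq : u0 = u
          · -- the head is the witness: i = k, the new accumulator is some k
            rw [heq] at hget0
            rw [hget] at hget0
            have hik : i = k := Option.some.inj hget0
            subst hik
            rcases hbest with h | ⟨b, hb, hkb⟩
            · subst h
              exact chrq_scan_ge rest pos i htail
            · subst hb
              have hif : (if i < b then some i else some b) = some i := by
                split_ifs with h
                · rfl
                · have : b = i := by omega
                  rw [this]
              simp only [hif]
              exact chrq_scan_ge rest pos i htail
          · have hu0 : u0 ∈ rest := by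
              rcases List.mem_cons.mp hmem with h | h
              · exact absurd h heq
              · exact h
            rcases hbest with h | ⟨b, hb, hkb⟩
            · subst h
              exact ih hu0 htail (some i) (Or.inr ⟨i, rfl, hk⟩)
            · subst hb
              simp only
              split_ifs with hib
              · exact ih hu0 htail (some i) (Or.inr ⟨i, rfl, hk⟩)
              · exact ih hu0 htail (some b) (Or.inr ⟨b, rfl, hkb⟩)

-- build preserves existing entries (only absent keys are inserted)
theorem chrq_build_preserve (r : List String) (k : Int) (pos : PySem.Dict String Int)
    (u : String) (v : Int) (h : pos.get? u = some v) :
    (chrqB_build r k pos).get? u = some v := by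
  induction r generalizing k pos with
  | nil => exact h
  | cons w rest ih =>
      simp only [chrqB_build]
      by_cases hc : pos.contains w
      · rw [if_pos hc]; exact ih (k + 1) pos h
      · rw [if_neg hc]
        apply ih
        have hwnone : pos.get? w = none :=
          (PySem.Dict.get?_eq_none_iff_contains pos w).mpr (Bool.eq_false_iff.mpr hc)
        have hw : u ≠ w := by
          intro he
          rw [he, hwnone] at h; cases h
        rw [PySem.Dict.get?_insert_of_ne pos k hw]
        exact h

-- entries created by build starting at index k have value >= k
theorem chrq_build_ge (r : List String) (k : Int) (pos : PySem.Dict String Int)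
    (u : String) (i : Int) (h0 : pos.get? u = none)
    (h : (chrqB_build r k pos).get? u = some i) : k ≤ i := by
  induction r generalizing k pos with
  | nil => simp only [chrqB_build] at h; rw [h0] at h; cases h
  | cons w rest ih =>
      simp only [chrqB_build] at h
      by_cases hc : pos.contains w
      · rw [if_pos hc] at h
        have := ih (k + 1) pos h0 h
        omega
      · rw [if_neg hc] at h
        by_cases hw : u = w
        · subst hw
          have hself : (pos.insert u k).get? u = some k := PySem.Dict.get?_insert_self pos u k
          have := chrq_build_preserve rest (k + 1) _ u k hself
          rw [this] at h
          have : k = i := Option.some.inj h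
          omega
        · have hnone : (pos.insert w k).get? u = none := by
            rw [PySem.Dict.get?_insert_of_ne pos k hw]; exact h0
          have := ih (k + 1) (pos.insert w k) hnone h
          omega

-- main invariant: as long as no gold uid is already in the table, B's two passes
-- compute exactly A's early-return scan
theorem chrq_main (r gold : List String) (k : Int) (pos : PySem.Dict String Int)
    (h : ∀ u ∈ gold, pos.get? u = none) :
    chrqB_scan (chrqB_build r k pos) gold none = chrqA_loop (PySem.Set.ofList gold) r k := by
  induction r generalizing k pos with
  | nil =>
      simp only [chrqB_build, chrqA_loop]
      exact chrq_scan_none gold pos none h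
  | cons u rest ih =>
      simp only [chrqB_build, chrqA_loop]
      by_cases hmem : u ∈ PySem.Set.ofList gold
      · rw [if_pos hmem]
        have hug : u ∈ gold := (PySem.Set.mem_ofList gold u).mp hmem
        have hnone : pos.get? u = none := h u hug
        have hc : pos.contains u = false :=
          (PySem.Dict.get?_eq_none_iff_contains pos u).mp hnone
        rw [if_neg (by simp [hc])]
        have hgetu : (chrqB_build rest (k + 1) (pos.insert u k)).get? u = some k :=
          chrq_build_preserve rest (k + 1) _ u k (PySem.Dict.get?_insert_self pos u k)
        apply chrq_scan_hit gold _ k u hgetu hug _ none (Or.inl rfl)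
        intro g hg i hgi
        by_cases hgu : g = u
        · subst hgu; rw [hgetu] at hgi
          have : k = i := Option.some.inj hgi
          omega
        · have hgn : (pos.insert u k).get? g = none := by
            rw [PySem.Dict.get?_insert_of_ne pos k hgu]; exact h g hg
          have := chrq_build_ge rest (k + 1) (pos.insert u k) g i hgn hgi
          omega
      · rw [if_neg hmem]
        have hug : u ∉ gold := fun hu => hmem ((PySem.Set.mem_ofList gold u).mpr hu)
        by_cases hc : pos.contains u
        · rw [if_pos hc]; exact ih (k + 1) pos h
        · rw [if_neg hc]
          apply ih (k + 1)
          intro g hg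
          have hgu : g ≠ u := fun he => hug (he ▸ hg)
          rw [PySem.Dict.get?_insert_of_ne pos k hgu]
          exact h g hg

-- ===== VERDICT (by name: the statement is the Claim_ definition above) =====
theorem compute_hit_rank_for_question_spec : Claim_equal_compute_hit_rank_for_question := by
  intro r g _
  unfold Spec_compute_hit_rank_for_question compute_hit_rank_for_question compute_hit_rank_for_question_alt
  exact (chrq_main r g 1 PySem.Dict.empty (fun u _ => PySem.Dict.get?_empty u)).symm
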